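-- pv_equiv track=rewrite | github.com/willpiam/starSign | main.py | dayCollections
-- ===== SOURCE A (Python) =====
-- def dayCollections(date): #function collects days into groups (splits the 365 days of the year into collections under the name of the sign)
--     signs = ["Aries","Taurus","Gemini","Cancer","Leo","Virgo","Libra","Scorpio","Sagittarius","Capricorn","Aquarius","Pisces"]
--     dates = [[80,81,82,83,84,85,86,87,89,90,91,92,93,94,95,96,97,98,99,100,101,102,103,104,105,106,107,108,109],[110,111,112,113,114,115,116,117,118,119,120,121,123,124,125,126,127,128,129,130,131,132,133,134,135,136,135,139,140],[141,142,143,144,145,146,147,148,149,150,151,152,153,154,155,156,157,158,159,160,161,162,163,164,165,166,167,168,169,170,171],[172,173,174,175,176,177,178,179,180,181,182,183,184,185,186,187,188,189,190,191,192,193,194,195,196,197,198,199,200,201,202,203],[204,205,206,207,208,209,210,211,212,213,214,215,216,217,218,219,220,221,222,223,224,225,226,227,228,229,230,231,232,233,234],[235,236,237,238,239,240,241,242,243,244,245,246,247,248,249,250,251,252,253,254,255,256,257,258,259,260,261,262,263,264,265],[266,267,268,269,270,271,272,273,274,275,276,277,278,279,280,281,282,283,284,285,286,287,288,289,290,291,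292,293,294,295],[296,297,298,299,300,301,302,303,304,305,306,307,308,309,310,311,312,313,314,315,316,317,318,319,320,321,322,323,324,325],[326,327,328,329,330,331,332,333,334,335,336,337,338,339,340,341,342,343,344,345,346,347,348,349,350,351,352,353,354,355],[356,357,358,359,360,361,362,363,364,365,1,2,3,4,5,6,7,8,9,10,11,12,13,14,15,16,17,18,19],[20,21,22,23,24,25,26,27,28,29,30,31,32,33,34,35,36,37,38,39,40,41,42,43,44,45,46,47,48,49],[50,51,52,53,54,55,56,57,58,59,60,61,62,63,64,65,66,67,68,69,70,71,72,73,74,75,76,77,78,79]]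
--     found = False
--     sign = "unknown"
--
--     for i in range (0,12):
--         for k in range (0, len(dates[i])):
--             if (dates[i][k] == date):
--                 #print (signs[i])
--                 sign = signs[i]
--
--     return sign
-- ===== SOURCE B (Python) =====
-- def dayCollections(date):
--     # Closed-form: each sign is a contiguous run of day numbers; scan 13
--     # thresholds from the top instead of searching 365 day numbers.
--     if date < 1 or date > 365:
--         return "unknown"
--     starts = [(356, "Capricorn"), (326, "Sagittarius"), (296, "Scorpio"),
--               (266, "Libra"), (235, "Virgo"), (204, "Leo"), (172, "Cancer"),
--               (141, "Gemini"), (110, "Taurus"), (80, "Aries"),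
--               (50, "Pisces"), (20, "Aquarius"), (1, "Capricorn")]
--     for start, name in starts:
--         if date >= start:
--             return name
--     return "unknown"  # unreachable: date >= 1 always meets the last threshold
-- ===== Notes on version B (the rewrite author's own statement) =====
-- stated objective: simpler
-- what changed: B replaces A's nested scan over twelve hard-coded 365-day lists with a closed-form scan of 13 range thresholds (each sign is a contiguous run of day numbers).
-- intended difference: On dates 88, 122, 137 and 138 A returns "unknown" because those day numbers are typo-gaps in its hand-typed day lists (89 vs 88, 123 vs 122, duplicated 135 instead of 137/138); B returns the enclosing sign (Aries for 88, Taurus for the others), the intended value since these are ordinary days of the year inside the signs' ranges. — e.g. on dayCollections(88): A returns "unknown", B returns "Aries"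
import Mathlib
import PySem

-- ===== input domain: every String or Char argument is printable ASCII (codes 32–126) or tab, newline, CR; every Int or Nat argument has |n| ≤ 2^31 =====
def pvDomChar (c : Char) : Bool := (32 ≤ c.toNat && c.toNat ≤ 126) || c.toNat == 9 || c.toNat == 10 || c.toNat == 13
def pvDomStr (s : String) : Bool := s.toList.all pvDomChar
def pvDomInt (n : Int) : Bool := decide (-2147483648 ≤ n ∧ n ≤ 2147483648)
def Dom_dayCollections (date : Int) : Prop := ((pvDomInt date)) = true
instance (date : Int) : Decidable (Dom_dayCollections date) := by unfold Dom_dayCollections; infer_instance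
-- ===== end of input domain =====

-- B replaces A's nested scan over twelve hard-coded 365-day lists with a closed-form
-- scan of 13 range thresholds; B fixes A's four typo-gap days (see D_ below).

-- ===== PORT A =====
def pvSigns : List String := ["Aries","Taurus","Gemini","Cancer","Leo","Virgo","Libra","Scorpio","Sagittarius","Capricorn","Aquarius","Pisces"]
def pvDates : List (List Int) := [[80,81,82,83,84,85,86,87,89,90,91,92,93,94,95,96,97,98,99,100,101,102,103,104,105,106,107,108,109],[110,111,112,113,114,115,116,117,118,119,120,121,123,124,125,126,127,128,129,130,131,132,133,134,135,136,135,139,140],[141,142,143,144,145,146,147,148,149,150,151,152,153,154,155,156,157,158,159,160,161,162,163,164,165,166,167,168,169,170,171],[172,173,174,175,176,177,178,179,180,181,182,183,184,185,186,187,188,189,190,191,192,193,194,195,196,197,198,199,200,201,202,203],[204,205,206,207,208,209,210,211,212,213,214,215,216,217,218,219,220,221,222,223,224,225,226,227,228,229,230,231,232,233,234],[235,236,237,238,239,240,241,242,243,244,245,246,247,248,249,250,251,252,253,254,255,256,257,258,259,260,261,262,263,264,265],[266,267,268,269,270,271,272,273,274,275,276,277,278,279,280,281,282,283,284,285,286,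287,288,289,290,291,292,293,294,295],[296,297,298,299,300,301,302,303,304,305,306,307,308,309,310,311,312,313,314,315,316,317,318,319,320,321,322,323,324,325],[326,327,328,329,330,331,332,333,334,335,336,337,338,339,340,341,342,343,344,345,346,347,348,349,350,351,352,353,354,355],[356,357,358,359,360,361,362,363,364,365,1,2,3,4,5,6,7,8,9,10,11,12,13,14,15,16,17,18,19],[20,21,22,23,24,25,26,27,28,29,30,31,32,33,34,35,36,37,38,39,40,41,42,43,44,45,46,47,48,49],[50,51,52,53,54,55,56,57,58,59,60,61,62,63,64,65,66,67,68,69,70,71,72,73,74,75,76,77,78,79]]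

def dayCollections (date : Int) : String :=
  (PySem.List.pyRange 0 12 1).foldl (fun sign i =>
    let di := PySem.List.pyGetD pvDates i []
    (PySem.List.pyRange 0 (PySem.List.len di) 1).foldl (fun sign k =>
      if PySem.List.pyGetD di k 0 == date then PySem.List.pyGetD pvSigns i "" else sign) sign)
    "unknown"

-- ===== PORT B =====
def pvStarts : List (Int × String) := [(356, "Capricorn"), (326, "Sagittarius"), (296, "Scorpio"),
  (266, "Libra"), (235, "Virgo"), (204, "Leo"), (172, "Cancer"),
  (141, "Gemini"), (110, "Taurus"), (80, "Aries"),
  (50, "Pisces"), (20, "Aquarius"), (1, "Capricorn")]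

-- B's for-loop with early return: first threshold ≤ date wins.
def pvScanStarts (date : Int) : List (Int × String) → String
  | [] => "unknown"   -- unreachable for date ≥ 1 (B's comment says the same)
  | (start, name) :: rest => if date ≥ start then name else pvScanStarts date rest

def dayCollections_alt (date : Int) : String :=
  if date < 1 ∨ date > 365 then "unknown"
  else pvScanStarts date pvStarts

-- ===== PRECONDITION & SPEC =====
-- On dates 88, 122, 137, 138 A returns "unknown" because those day numbers are typo-gaps
-- in its hand-typed day lists; B returns the enclosing sign (Aries / Taurus), the intended
-- value since these are ordinary days of the year inside the signs' ranges.
def D_dayCollections (date : Int) : Prop := date = 88 ∨ date = 122 ∨ date = 137 ∨ date = 138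
instance (date : Int) : Decidable (D_dayCollections date) := by unfold D_dayCollections; infer_instance

def Spec_dayCollections (date : Int) (out : String) : Prop := ¬ D_dayCollections date → out = dayCollections_alt date
instance (date : Int) (out : String) : Decidable (Spec_dayCollections date out) := by unfold Spec_dayCollections; infer_instance

def pvDiffWitness_dayCollections : Int := 88
def pvDiffWitnessOut_dayCollections : String × String := ("unknown", "Aries")

-- ===== CLAIM (what is proved, stated in full; the proofs are below) =====
def Claim_unchanged_dayCollections : Prop := ∀ (date : Int), Dom_dayCollections date → Spec_dayCollections date (dayCollections date)
def Claim_changed_dayCollections : Prop := Dom_dayCollections (pvDiffWitness_dayCollections) ∧ D_dayCollections (pvDiffWitness_dayCollections) ∧ dayCollections (pvDiffWitness_dayCollections) = pvDiffWitnessOut_dayCollections.1 ∧ dayCollections_alt (pvDiffWitness_dayCollections) = pvDiffWitnessOut_dayCollections.2 ∧ pvDiffWitnessOut_dayCollections.1 ≠ pvDiffWitnessOut_dayCollections.2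
def Claim_exact_dayCollections : Prop := ∀ (date : Int), Dom_dayCollections date → D_dayCollections date → dayCollections date ≠ dayCollections_alt date

-- ===== LEMMAS AND PROOFS =====

-- A's inner loop over one day list: last match wins, i.e. "did date occur in the list?".
set_option maxRecDepth 4000 in
theorem pvInnerLoop (xs : List Int) (d : Int) (v s : String) :
    (PySem.List.pyRange 0 (PySem.List.len xs) 1).foldl
      (fun s k => if PySem.List.pyGetD xs k 0 == d then v else s) s
    = if d ∈ xs then v else s := by
  rw [PySem.List.foldl_pyRange_zero_pyGetD xs 0 (fun s x => if x == d then v else s) s]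
  induction xs generalizing s with
  | nil => simp
  | cons a t ih =>
    simp only [List.foldl_cons, ih, List.mem_cons]
    by_cases hd : d ∈ t
    · simp [hd]
    · by_cases ha : d = a
      · subst ha; simp
      · have ha' : ¬(a = d) := fun h => ha h.symm
        simp [hd, ha, ha']

-- A in closed form: twelve memberships, later lists overwrite earlier ones.
theorem pvAChar (d : Int) :
    dayCollections d =
      (pvDates.zip pvSigns).foldl (fun s p => if d ∈ p.1 then p.2 else s) "unknown" := by
  unfold dayCollections
  have hr : PySem.List.pyRange 0 12 1 = [0,1,2,3,4,5,6,7,8,9,10,11] := by decide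
  rw [hr]
  simp only [List.foldl_cons, List.foldl_nil, pvInnerLoop]
  rfl

theorem pvBounded : ∀ l ∈ pvDates, ∀ x ∈ l, 1 ≤ x ∧ x ≤ 365 := by decide

-- folding "no match" steps leaves the accumulator unchanged
theorem pvFoldlNone (d : Int) : ∀ (l : List (List Int × String)) (s : String),
    (∀ p ∈ l, d ∉ p.1) → l.foldl (fun s p => if d ∈ p.1 then p.2 else s) s = s := by
  intro l
  induction l with
  | nil => intro s _; rfl
  | cons a t ih =>
    intro s hz
    simp only [List.foldl_cons, if_neg (hz a (by simp))]
    exact ih s (fun p hp => hz p (by simp [hp]))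

-- agreement on all in-range days outside the four typo gaps (finite check)
set_option maxRecDepth 100000 in
theorem pvSmall : ∀ n : Nat, n < 366 →
    (n = 88 ∨ n = 122 ∨ n = 137 ∨ n = 138) ∨
      dayCollections (n : Int) = dayCollections_alt (n : Int) := by decide

-- ===== VERDICT (by name: the statement is the Claim_ definition above) =====
theorem dayCollections_spec : Claim_unchanged_dayCollections := by
  intro date _ hD
  by_cases hr : 1 ≤ date ∧ date ≤ 365
  · have hn : date = ((date.toNat : Nat) : Int) := by omega
    rcases pvSmall date.toNat (by omega) with h | h
    · exfalso; apply hD; unfold D_dayCollections; omega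
    · rw [hn]; exact h
  · -- out of range: both sides are "unknown"
    have hA : dayCollections date = "unknown" := by
      rw [pvAChar]
      have : ∀ l ∈ pvDates, date ∉ l := by
        intro l hl hmem
        have := pvBounded l hl date hmem
        omega
      exact pvFoldlNone date _ "unknown"
        (fun p hp => this p.1 (List.of_mem_zip hp).1)
    have hB : dayCollections_alt date = "unknown" := by
      unfold dayCollections_alt
      rw [if_pos (by omega)]
    rw [hA, hB]

set_option maxRecDepth 100000 in
theorem dayCollections_changed : Claim_changed_dayCollections := by
  unfold Claim_changed_dayCollections; decide

set_option maxRecDepth 100000 in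
theorem dayCollections_tight : Claim_exact_dayCollections := by
  intro date _ hD
  unfold D_dayCollections at hD
  rcases hD with h | h | h | h <;> subst h <;> decide
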